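-- pv_equiv track=rewrite | github.com/yokozhem/deep_python_lessons | lesson_1_task_1.py | sum_of_even_excluding_multiples
-- ===== SOURCE A (Python) =====
-- def sum_of_even_excluding_multiples(n, e):
--     sum_even = 0
--     i = 1
--     while i <= n:
--         if i % 2 == 0 and i % e != 0:
--             sum_even += i
--         i += 1
--     return sum_even
-- ===== SOURCE B (Python) =====
-- def sum_of_even_excluding_multiples(n, e):
--     if n < 2:
--         return 0
--     k = n // 2
--     total = k * (k + 1)
--     L = abs(e) if e % 2 == 0 else 2 * abs(e)
--     j = n // L
--     return total - L * (j * (j + 1) // 2)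
-- ===== Notes on version B (the rewrite author's own statement) =====
-- stated objective: faster
-- what changed: Replaces the O(n) while-loop with O(1) closed-form arithmetic: the triangular-number formula for the sum of evens up to n minus the arithmetic series of the even multiples of e (stride lcm-like L = |e| if e even else 2|e|).
import Mathlib
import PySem

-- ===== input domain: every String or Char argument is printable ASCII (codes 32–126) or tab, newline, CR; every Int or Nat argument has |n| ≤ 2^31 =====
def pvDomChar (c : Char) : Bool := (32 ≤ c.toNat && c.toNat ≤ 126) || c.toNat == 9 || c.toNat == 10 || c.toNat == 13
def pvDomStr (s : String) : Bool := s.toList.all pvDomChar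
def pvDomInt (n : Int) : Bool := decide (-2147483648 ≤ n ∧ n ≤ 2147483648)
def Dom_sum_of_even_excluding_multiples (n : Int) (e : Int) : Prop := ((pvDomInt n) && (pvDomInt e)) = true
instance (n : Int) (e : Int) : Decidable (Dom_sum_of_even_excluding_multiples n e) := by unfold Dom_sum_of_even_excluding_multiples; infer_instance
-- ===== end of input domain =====

-- B replaces A's O(n) counting loop with O(1) closed-form arithmetic series.

-- ===== PORT A =====
-- literal port of A: while i <= n accumulating even i with i % e != 0 (as a fold over range(1, n+1))
def sum_of_even_excluding_multiples (n : Int) (e : Int) : Int :=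
  (PySem.List.pyRange 1 (n + 1) 1).foldl
    (fun sum_even i =>
      if PySem.Int.mod i 2 = 0 ∧ PySem.Int.mod i e ≠ 0 then sum_even + i else sum_even)
    0

-- ===== PORT B =====
-- literal port of Source B: closed form
def sum_of_even_excluding_multiples_alt (n : Int) (e : Int) : Int :=
  if n < 2 then 0
  else
    let k := PySem.Int.floordiv n 2
    let total := k * (k + 1)
    let L := if PySem.Int.mod e 2 = 0 then |e| else 2 * |e|
    let j := PySem.Int.floordiv n L
    total - L * (PySem.Int.floordiv (j * (j + 1)) 2)

-- ===== PRECONDITION & SPEC =====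
-- Pre_ excludes exactly the inputs where A raises ZeroDivisionError: e = 0 with the loop reaching an even i (n ≥ 2).
def Pre_sum_of_even_excluding_multiples (n : Int) (e : Int) : Prop := e ≠ 0 ∨ n < 2
instance (n : Int) (e : Int) : Decidable (Pre_sum_of_even_excluding_multiples n e) := by unfold Pre_sum_of_even_excluding_multiples; infer_instance
def pvWitness_sum_of_even_excluding_multiples : Int × Int := (10, 3)

def Spec_sum_of_even_excluding_multiples (n : Int) (e : Int) (out : Int) : Prop := out = sum_of_even_excluding_multiples_alt n e
instance (n : Int) (e : Int) (out : Int) : Decidable (Spec_sum_of_even_excluding_multiples n e out) := by unfold Spec_sum_of_even_excluding_multiples; infer_instance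

-- ===== CLAIM (what is proved, stated in full; the proofs are below) =====
def Claim_equal_sum_of_even_excluding_multiples : Prop := ∀ (n : Int) (e : Int), Dom_sum_of_even_excluding_multiples n e → Pre_sum_of_even_excluding_multiples n e → Spec_sum_of_even_excluding_multiples n e (sum_of_even_excluding_multiples n e)

-- ===== LEMMAS AND PROOFS =====

-- the stride of the excluded arithmetic progression (the L of port B)
def pvL (e : Int) : Int := if PySem.Int.mod e 2 = 0 then |e| else 2 * |e|

-- the closed form of port B without the n < 2 guard, in ediv language
def pvF (n e : Int) : Int :=
  (n / 2) * (n / 2 + 1) - pvL e * ((n / pvL e) * (n / pvL e + 1) / 2)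

lemma pvL_pos (e : Int) (he : e ≠ 0) : 2 ≤ pvL e := by
  unfold pvL
  have hnn := abs_nonneg e
  split_ifs with h
  · rw [PySem.Int.mod_eq_zero_iff_dvd] at h
    rcases abs_choice e with h' | h' <;> omega
  · rcases abs_choice e with h' | h' <;> omega

lemma pvL_dvd (e x : Int) : pvL e ∣ x ↔ (2 ∣ x ∧ e ∣ x) := by
  unfold pvL
  have hnn := abs_nonneg e
  split_ifs with h
  · rw [PySem.Int.mod_eq_zero_iff_dvd] at h
    rw [abs_dvd]
    exact ⟨fun hx => ⟨h.trans hx, hx⟩, fun hx => hx.2⟩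
  · rw [PySem.Int.mod_eq_zero_iff_dvd] at h
    constructor
    · intro hx
      exact ⟨(dvd_mul_right 2 |e|).trans hx, (abs_dvd e x).mp ((dvd_mul_left |e| 2).trans hx)⟩
    · rintro ⟨h2x, hex⟩
      rw [← abs_dvd] at hex
      obtain ⟨t, rfl⟩ := hex
      have h2t : (2 : Int) ∣ t := by
        rcases (Int.prime_two.dvd_mul.mp h2x) with h' | h'
        · exact absurd ((dvd_abs 2 e).mp h') h
        · exact h'
      obtain ⟨s, rfl⟩ := h2t
      exact ⟨s, by ring⟩

-- stepping an Euclidean quotient by one (positive divisor)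
lemma pv_ediv_succ (n L : Int) (hL : 0 < L) :
    (n + 1) / L = n / L + (if L ∣ (n + 1) then 1 else 0) := by
  have h := Int.emod_add_mul_ediv n L
  have hr0 : 0 ≤ n % L := Int.emod_nonneg n hL.ne'
  have hrL : n % L < L := Int.emod_lt_of_pos n hL
  by_cases hd : L ∣ (n + 1)
  · simp only [hd, if_true]
    obtain ⟨q, hq⟩ := hd
    have h1 : (n + 1) / L = q := by rw [hq]; exact Int.mul_ediv_cancel_left q hL.ne'
    have h2 : n / L = q - 1 :=
      ((Int.ediv_emod_unique hL).2
        (⟨by linear_combination -hq, by omega, by omega⟩ :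
          L - 1 + L * (q - 1) = n ∧ 0 ≤ L - 1 ∧ L - 1 < L)).1
    omega
  · simp only [hd, if_false, add_zero]
    have hr : n % L < L - 1 := by
      by_contra hcon
      have hrr : n % L = L - 1 := by omega
      exact hd ⟨n / L + 1, by linear_combination -h + hrr⟩
    exact ((Int.ediv_emod_unique hL).2
      (⟨by linear_combination h, by omega, by omega⟩ :
        n % L + 1 + L * (n / L) = n + 1 ∧ 0 ≤ n % L + 1 ∧ n % L + 1 < L)).1

lemma pvF_step (n e : Int) (he : e ≠ 0) :
    pvF (n + 1) e = pvF n e + (if 2 ∣ (n + 1) ∧ ¬ e ∣ (n + 1) then n + 1 else 0) := by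
  have hL2 := pvL_pos e he
  have hL : (0 : Int) < pvL e := by omega
  have hdL := pvL_dvd e (n + 1)
  have e2 := pv_ediv_succ n 2 (by norm_num)
  have eL := pv_ediv_succ n (pvL e) hL
  unfold pvF
  rw [e2, eL]
  obtain ⟨t, ht⟩ := Int.even_mul_succ_self (n / pvL e)
  obtain ⟨t', ht'⟩ := Int.even_mul_succ_self (n / pvL e + 1)
  have htv : (n / pvL e) * (n / pvL e + 1) / 2 = t := by omega
  have ht'v : (n / pvL e + 1) * (n / pvL e + 1 + 1) / 2 = t' := by omega
  have hE1 : t' = t + (n / pvL e + 1) := by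
    have hx : (n / pvL e + 1) * (n / pvL e + 1 + 1)
        = (n / pvL e) * (n / pvL e + 1) + 2 * (n / pvL e + 1) := by ring
    omega
  by_cases c2 : (2 : Int) ∣ (n + 1)
  · have h2k : 2 * (n / 2 + 1) = n + 1 := by
      have hc := Int.mul_ediv_cancel' c2
      rw [e2, if_pos c2] at hc
      linarith
    by_cases ce : e ∣ (n + 1)
    · have hdvd : pvL e ∣ (n + 1) := hdL.2 ⟨c2, ce⟩
      have hLj : pvL e * (n / pvL e + 1) = n + 1 := by
        have hc := Int.mul_ediv_cancel' hdvd
        rw [eL, if_pos hdvd] at hc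
        linarith [hc]
      simp only [c2, if_true, hdvd, ce, not_true, and_false, if_false, add_zero]
      rw [ht'v, htv]
      linear_combination h2k - pvL e * hE1 - hLj
    · have hdvd : ¬ pvL e ∣ (n + 1) := fun hx => ce (hdL.1 hx).2
      simp only [c2, hdvd, ce, not_false_iff, and_true, if_false, if_true, add_zero]
      rw [htv]
      linear_combination h2k
  · have hdvd : ¬ pvL e ∣ (n + 1) := fun hx => c2 (hdL.1 hx).1
    simp only [c2, hdvd, false_and, if_false, add_zero]

-- port B equals the guard-free closed form for n ≥ 1
lemma alt_eq_pvF (n e : Int) (he : e ≠ 0) (h1 : 1 ≤ n) :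
    sum_of_even_excluding_multiples_alt n e = pvF n e := by
  have hL2 := pvL_pos e he
  have hL : (0 : Int) < pvL e := by omega
  unfold sum_of_even_excluding_multiples_alt pvF
  by_cases h2 : n < 2
  · have hn1 : n = 1 := by omega
    subst hn1
    have e1 : (1 : Int) / pvL e = 0 := Int.ediv_eq_zero_of_lt (by omega) (by omega)
    rw [e1]
    norm_num
  · simp only [h2, if_false]
    rw [show PySem.Int.floordiv n 2 = n / 2 from PySem.Int.floordiv_eq_ediv_of_pos (by norm_num)]
    have hLalt : (if PySem.Int.mod e 2 = 0 then |e| else 2 * |e|) = pvL e := rfl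
    rw [hLalt,
      show PySem.Int.floordiv n (pvL e) = n / pvL e from PySem.Int.floordiv_eq_ediv_of_pos hL,
      show PySem.Int.floordiv ((n / pvL e) * (n / pvL e + 1)) 2
          = (n / pvL e) * (n / pvL e + 1) / 2 from PySem.Int.floordiv_eq_ediv_of_pos (by norm_num)]

-- port A on an empty range
lemma A_nil (n e : Int) (h : n < 1) : sum_of_even_excluding_multiples n e = 0 := by
  unfold sum_of_even_excluding_multiples
  rw [PySem.List.pyRange_one_eq_nil (by omega)]
  rfl

-- port A at n = 1 (the single index 1 is odd, so nothing is added)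
lemma A_one (e : Int) : sum_of_even_excluding_multiples 1 e = 0 := by
  unfold sum_of_even_excluding_multiples
  rw [show (1 : Int) + 1 = 1 + 1 from rfl, PySem.List.pyRange_one_singleton]
  simp [List.foldl, PySem.Int.mod]

-- one more loop iteration of port A
lemma A_step (n e : Int) (h : 0 ≤ n) :
    sum_of_even_excluding_multiples (n + 1) e
      = sum_of_even_excluding_multiples n e
        + (if 2 ∣ (n + 1) ∧ ¬ e ∣ (n + 1) then n + 1 else 0) := by
  unfold sum_of_even_excluding_multiples
  rw [PySem.List.pyRange_one_succ_right (by omega : (1 : Int) ≤ n + 1), List.foldl_append]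
  simp only [List.foldl, Ne, PySem.Int.mod_eq_zero_iff_dvd]
  split_ifs <;> ring

lemma main_nat (e : Int) (he : e ≠ 0) :
    ∀ m : Nat, sum_of_even_excluding_multiples (m : Int) e
      = sum_of_even_excluding_multiples_alt (m : Int) e := by
  intro m
  induction m with
  | zero =>
    rw [Nat.cast_zero, A_nil 0 e (by norm_num)]
    norm_num [sum_of_even_excluding_multiples_alt]
  | succ m ih =>
    rcases Nat.eq_zero_or_pos m with rfl | hm
    · rw [show ((0 + 1 : Nat) : Int) = 1 by norm_num, A_one e]
      norm_num [sum_of_even_excluding_multiples_alt]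
    · have hm1 : (1 : Int) ≤ (m : Int) := by exact_mod_cast hm
      push_cast
      rw [A_step _ _ (by omega), ih, alt_eq_pvF _ _ he hm1,
        alt_eq_pvF _ _ he (by omega), pvF_step _ _ he]

-- ===== VERDICT (by name: the statement is the Claim_ definition above) =====
theorem sum_of_even_excluding_multiples_spec : Claim_equal_sum_of_even_excluding_multiples := by
  intro n e _ hpre
  unfold Spec_sum_of_even_excluding_multiples
  by_cases hn : n < 1
  · rw [A_nil n e hn]
    unfold sum_of_even_excluding_multiples_alt
    rw [if_pos (by omega)]
  · by_cases he : e = 0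
    · have hn1 : n = 1 := by
        rcases hpre with h | h
        · exact absurd he h
        · omega
      subst hn1
      rw [A_one e]
      norm_num [sum_of_even_excluding_multiples_alt]
    · have hcast : n = ((n.toNat : Int)) := by omega
      rw [hcast]
      exact main_nat e he n.toNat
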